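-- pv_equiv track=rewrite | github.com/Koval-16/niduc | voting_algorithm.py | smoothing_algorithm
-- ===== SOURCE A (Python) =====
-- def smoothing_algorithm(values, previous_result, threshold):
--     if not values: return None
--     from collections import Counter
--     counter = Counter(values)
--     max_votes = max(counter.values())
--     majority_candidates = [val for val, count in counter.items() if count==max_votes]
--     if max_votes > len(values) // 2:
--         return majority_candidates[0]
--     closest_value = None
--     smallest_distance = float('inf')
--     for value in values:
--         distance = abs(value-previous_result)
--         if distance < smallest_distance and value!=0:
--             closest_value = value
--             smallest_distance = distance
--     if smallest_distance <= threshold: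
--         return closest_value
--     return 0 #NONE
-- ===== SOURCE B (Python) =====
-- def smoothing_algorithm(values, previous_result, threshold):
--     if not values:
--         return None
--     # Boyer-Moore majority vote, then verify the candidate.
--     candidate, count = 0, 0
--     for v in values:
--         if count == 0:
--             candidate, count = v, 1
--         elif v == candidate:
--             count += 1
--         else:
--             count -= 1
--     if values.count(candidate) > len(values) // 2:
--         return candidate
--     nonzero = [v for v in values if v != 0]
--     if nonzero:
--         best = min(nonzero, key=lambda v: abs(v - previous_result))
--         if abs(best - previous_result) <= threshold:
--             return best
--     return 0
-- ===== Notes on version B (the rewrite author's own statement) =====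
-- stated objective: faster
-- what changed: The Counter/max/first-max-candidate majority detection is replaced by a single-pass Boyer-Moore majority vote with a verification count, and the explicit closest-value accumulator loop is replaced by min(..., key=abs distance) over the nonzero values.
import Mathlib
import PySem

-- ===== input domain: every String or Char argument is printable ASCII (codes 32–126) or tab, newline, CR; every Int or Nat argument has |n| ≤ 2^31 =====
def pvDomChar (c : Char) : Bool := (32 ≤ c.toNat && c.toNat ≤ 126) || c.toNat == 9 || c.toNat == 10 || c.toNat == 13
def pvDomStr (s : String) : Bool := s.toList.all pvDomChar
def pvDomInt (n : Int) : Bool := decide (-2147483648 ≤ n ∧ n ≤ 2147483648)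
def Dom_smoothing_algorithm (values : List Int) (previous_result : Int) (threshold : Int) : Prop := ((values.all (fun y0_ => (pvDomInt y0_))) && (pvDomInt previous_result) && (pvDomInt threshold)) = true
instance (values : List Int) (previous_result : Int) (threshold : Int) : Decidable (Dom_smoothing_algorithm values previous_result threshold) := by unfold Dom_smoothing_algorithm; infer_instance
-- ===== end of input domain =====

-- B replaces A's Counter/max majority detection by a Boyer–Moore vote with a verification
-- count, and A's closest-value scan by min over the nonzero values (measured constant-factor faster in a timing run).

-- ===== PORT A =====
-- one step of A's 'for value in values' closest-value loop; state = (closest_value, smallest_distance),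
-- with 'none' in the second slot standing for float('inf') and in the first for Python's None
def pvCloseStep (previous_result : Int) (s : Option Int × Option Int) (value : Int) : Option Int × Option Int :=
  let distance := |value - previous_result|
  if ((match s.2 with | none => true | some d => decide (distance < d)) && (value != 0)) then
    (some value, some distance)
  else s

def smoothing_algorithm (values : List Int) (previous_result : Int) (threshold : Int) : Option Int :=
  if values = [] then none
  else
    -- counter = Counter(values); max_votes = max(counter.values())
    match PySem.List.max? (PySem.Dict.counter values).values (fun x => x) with
    | none => none  -- unreachable: counter is nonempty here, Python's max never sees an empty sequence
    | some max_votes =>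
      if max_votes > PySem.Int.floordiv (values.length : Int) 2 then
        -- majority_candidates[0]
        PySem.List.pyGet?
          (((PySem.Dict.counter values).items.filter (fun p => p.2 == max_votes)).map (fun p => p.1)) 0
      else
        -- the closest-value loop; state = (closest_value, smallest_distance)
        if (match (values.foldl (pvCloseStep previous_result) (none, none)).2 with
            | none => false | some d => decide (d ≤ threshold)) then
          (values.foldl (pvCloseStep previous_result) (none, none)).1
        else some 0

-- ===== PORT B =====
-- one step of B's Boyer–Moore loop; state = (candidate, count)
def pvBmStep (s : Int × Int) (v : Int) : Int × Int :=
  if s.2 = 0 then (v, 1)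
  else if v = s.1 then (s.1, s.2 + 1)
  else (s.1, s.2 - 1)

def smoothing_algorithm_alt (values : List Int) (previous_result : Int) (threshold : Int) : Option Int :=
  if values = [] then none
  else
    -- candidate = Boyer–Moore vote; verify with values.count(candidate)
    if (PySem.List.count values (values.foldl pvBmStep (0, 0)).1 : Int) >
        PySem.Int.floordiv (values.length : Int) 2 then
      some (values.foldl pvBmStep (0, 0)).1
    else
      -- best = min(nonzero, key=lambda v: abs(v - previous_result)) if nonzero else fall through to 0
      match PySem.List.min? (values.filter (fun v => v != 0)) (fun v => |v - previous_result|) with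
      | none => some 0
      | some best => if |best - previous_result| ≤ threshold then some best else some 0

-- ===== PRECONDITION & SPEC =====
def Spec_smoothing_algorithm (values : List Int) (previous_result : Int) (threshold : Int) (out : Option Int) : Prop := out = smoothing_algorithm_alt values previous_result threshold
instance (values : List Int) (previous_result : Int) (threshold : Int) (out : Option Int) : Decidable (Spec_smoothing_algorithm values previous_result threshold out) := by unfold Spec_smoothing_algorithm; infer_instance

-- ===== CLAIM (what is proved, stated in full; the proofs are below) =====
def Claim_equal_smoothing_algorithm : Prop := ∀ (values : List Int) (previous_result : Int) (threshold : Int), Dom_smoothing_algorithm values previous_result threshold → Spec_smoothing_algorithm values previous_result threshold (smoothing_algorithm values previous_result threshold)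

-- ===== LEMMAS AND PROOFS =====

-- two distinct values cannot each occupy more than half of the list
theorem pv_count_two_le (a b : Int) (h : a ≠ b) (l : List Int) :
    List.count a l + List.count b l ≤ l.length := by
  induction l with
  | nil => simp
  | cons x t ih =>
    by_cases hx : x = a <;> by_cases hy : x = b <;>
      simp_all <;> omega

-- Boyer–Moore invariant: signed score of each value against the running state
theorem pv_bm_inv (l : List Int) (c k : Int) (x : Int) :
    2 * (List.count x l : Int) + (if x = c then k else -k) ≤
      (l.length : Int) + (if x = (l.foldl pvBmStep (c, k)).1 then (l.foldl pvBmStep (c, k)).2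
                          else -((l.foldl pvBmStep (c, k)).2)) := by
  induction l generalizing c k with
  | nil => simp
  | cons v t ih =>
    rw [List.foldl_cons]
    by_cases hk : k = 0
    · rw [show pvBmStep (c, k) v = (v, 1) by simp [pvBmStep, hk]]
      have h1 := ih v 1
      clear ih
      simp only [List.count_cons, List.length_cons, beq_iff_eq] at *
      push_cast at h1 ⊢
      split_ifs at h1 ⊢ <;> omega
    · by_cases hvc : v = c
      · rw [show pvBmStep (c, k) v = (c, k + 1) by simp [pvBmStep, hk, hvc]]
        have h1 := ih c (k + 1)
        clear ih
        simp only [List.count_cons, List.length_cons, beq_iff_eq] at *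
        push_cast at h1 ⊢
        split_ifs at h1 ⊢ <;> omega
      · rw [show pvBmStep (c, k) v = (c, k - 1) by simp [pvBmStep, hk, hvc]]
        have h1 := ih c (k - 1)
        clear ih
        simp only [List.count_cons, List.length_cons, beq_iff_eq] at *
        push_cast at h1 ⊢
        split_ifs at h1 ⊢ <;> omega

theorem pv_bm_count_nonneg (l : List Int) (c k : Int) (hk : 0 ≤ k) :
    0 ≤ (l.foldl pvBmStep (c, k)).2 := by
  induction l generalizing c k with
  | nil => simpa
  | cons v t ih =>
    rw [List.foldl_cons]
    by_cases hk0 : k = 0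
    · rw [show pvBmStep (c, k) v = (v, 1) by simp [pvBmStep, hk0]]
      exact ih v 1 (by omega)
    · by_cases hvc : v = c
      · rw [show pvBmStep (c, k) v = (c, k + 1) by simp [pvBmStep, hk0, hvc]]
        exact ih c (k + 1) (by omega)
      · rw [show pvBmStep (c, k) v = (c, k - 1) by simp [pvBmStep, hk0, hvc]]
        exact ih c (k - 1) (by omega)

-- any strict-majority value is the Boyer–Moore candidate
theorem pv_bm_majority (l : List Int) (x : Int) (hx : l.length < 2 * List.count x l) :
    x = (l.foldl pvBmStep (0, 0)).1 := by
  by_contra hne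
  have h1 := pv_bm_inv l 0 0 x
  have h2 := pv_bm_count_nonneg l 0 0 (le_refl 0)
  simp only [if_neg hne] at h1
  simp at h1
  omega

-- the inner (nonzero-filtered) step of A's closest-value loop is exactly min?'s step
theorem pv_close_filter (l : List Int) (p : Int) (s : Option Int × Option Int) :
    l.foldl (pvCloseStep p) s =
      (l.filter (fun v => v != 0)).foldl
        (fun s v =>
          if (match s.2 with | none => true | some d => decide (|v - p| < d)) then
            (some v, some (|v - p|))
          else s) s := by
  induction l generalizing s with
  | nil => rfl
  | cons v t ih =>
    by_cases hv : v = 0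
    · subst hv
      simp only [List.filter_cons]
      norm_num
      rw [show pvCloseStep p s 0 = s by unfold pvCloseStep; simp]
      exact ih s
    · simp only [List.filter_cons]
      norm_num [hv]
      rw [show pvCloseStep p s v =
          (if (match s.2 with | none => true | some d => decide (|v - p| < d)) then
            (some v, some (|v - p|)) else s) by
        unfold pvCloseStep; simp [hv]]
      split <;> exact ih _

-- the min?-style accumulator step, named so it can be shared between the lemmas below
def pvMinStep (p : Int) (acc : Option Int) (x : Int) : Option Int :=
  match acc with
  | none => some x
  | some m => if |x - p| < |m - p| then some x else some m

-- that fold tracks min? : the state is always (current min, its key)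
theorem pv_close_min (l : List Int) (p : Int) (o : Option Int) :
    l.foldl
        (fun s v =>
          if (match s.2 with | none => true | some d => decide (|v - p| < d)) then
            (some v, some (|v - p|))
          else s) (o, o.map (fun v => |v - p|)) =
      (l.foldl (pvMinStep p) o, (l.foldl (pvMinStep p) o).map (fun v => |v - p|)) := by
  induction l generalizing o with
  | nil => rfl
  | cons v t ih =>
    cases o with
    | none => simpa [pvMinStep] using ih (some v)
    | some m =>
      by_cases h : |v - p| < |m - p|
      · simpa [pvMinStep, h] using ih (some v)
      · simpa [pvMinStep, h] using ih (some m)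

theorem pv_min?_eq_foldl (l : List Int) (p : Int) :
    PySem.List.min? l (fun v => |v - p|) = l.foldl (pvMinStep p) none := by
  unfold PySem.List.min?
  apply PySem.List.foldl_congr_mem
  intro acc x _
  cases acc <;> rfl

-- pyGet? at index 0 of a nonempty list is its head
theorem pv_pyGet?_zero {α : Type} (l : List α) (h : l ≠ []) :
    PySem.List.pyGet? l 0 = l.head? := by
  cases l with
  | nil => simp at h
  | cons a t => simp [PySem.List.pyGet?, PySem.List.pyIdx?]

theorem smoothing_algorithm_spec_aux (values : List Int) (previous_result threshold : Int) :
    smoothing_algorithm values previous_result threshold =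
      smoothing_algorithm_alt values previous_result threshold := by
  by_cases hvne : values = []
  · simp [smoothing_algorithm, smoothing_algorithm_alt, hvne]
  · unfold smoothing_algorithm smoothing_algorithm_alt
    rw [if_neg hvne, if_neg hvne]
    have hvals : (PySem.Dict.counter values).values =
        (PySem.Set.ofList values).map (fun k => ((List.count k values : Nat) : Int)) := by
      show ((PySem.Dict.counter values).items).map (fun x => x.2) = _
      rw [PySem.Dict.items_counter]; simp
    have hofne : PySem.Set.ofList values ≠ [] := by
      cases values with
      | nil => exact absurd rfl hvne
      | cons a t =>
        intro h
        have ha : a ∈ PySem.Set.ofList (a :: t) := by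
          rw [PySem.Set.mem_ofList]; exact List.mem_cons_self ..
        rw [h] at ha; simp at ha
    have hvne2 : (PySem.Dict.counter values).values ≠ [] := by
      rw [hvals]; simpa using hofne
    obtain ⟨mv, hmv⟩ : ∃ mv, PySem.List.max? (PySem.Dict.counter values).values (fun x => x) = some mv := by
      cases h : PySem.List.max? (PySem.Dict.counter values).values (fun x => x) with
      | none => exact absurd ((PySem.List.max?_eq_none_iff _ _).1 h) hvne2
      | some mv => exact ⟨mv, rfl⟩
    rw [hmv]
    simp only []
    -- mv is the count of some element, and bounds every count
    obtain ⟨k0, hk0mem, hk0⟩ : ∃ k0, k0 ∈ values ∧ mv = ((List.count k0 values : Nat) : Int) := by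
      have hmem := PySem.List.max?_mem hmv
      rw [hvals] at hmem
      obtain ⟨k0, hk0, hval⟩ := List.mem_map.1 hmem
      exact ⟨k0, (PySem.Set.mem_ofList ..).1 hk0, hval.symm⟩
    have hbound : ∀ j ∈ values, ((List.count j values : Nat) : Int) ≤ mv := by
      intro j hj
      have hmem : ((List.count j values : Nat) : Int) ∈ (PySem.Dict.counter values).values := by
        rw [hvals]
        exact List.mem_map_of_mem ((PySem.Set.mem_ofList ..).2 hj)
      exact PySem.List.max?_isMax hmv _ hmem
    have hfd : PySem.Int.floordiv (values.length : Int) 2 = ((values.length / 2 : Nat) : Int) := by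
      exact_mod_cast PySem.Int.floordiv_natCast values.length 2
    by_cases hmaj : ∃ x, values.length < 2 * List.count x values
    · -- a strict majority exists: both branches return it
      obtain ⟨m, hm⟩ := hmaj
      have hmmem : m ∈ values := by
        rw [← List.count_pos_iff]; omega
      have hk0m : k0 = m := by
        by_contra hne
        have h2 := pv_count_two_le k0 m hne values
        have h4 := hbound m hmmem
        rw [hk0] at h4
        have h5 : List.count m values ≤ List.count k0 values := by exact_mod_cast h4
        omega
      have hmvm : mv = ((List.count m values : Nat) : Int) := by rw [hk0, hk0m]
      have hcondA : mv > PySem.Int.floordiv (values.length : Int) 2 := by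
        rw [hfd, hmvm]
        have h6 : values.length / 2 < List.count m values := by omega
        exact_mod_cast h6
      rw [if_pos hcondA]
      have hcand : (values.foldl pvBmStep (0, 0)).1 = m := (pv_bm_majority values m hm).symm
      have hcondB : (PySem.List.count values (values.foldl pvBmStep (0, 0)).1 : Int) >
          PySem.Int.floordiv (values.length : Int) 2 := by
        rw [hcand, hfd]
        show ((values.length / 2 : Nat) : Int) < ((List.count m values : Nat) : Int)
        have h6 : values.length / 2 < List.count m values := by omega
        exact_mod_cast h6
      rw [if_pos hcondB, hcand]
      -- majority_candidates reduces to the filtered distinct values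
      have hmc : (((PySem.Dict.counter values).items.filter (fun p => p.2 == mv)).map (fun p => p.1)) =
          (PySem.Set.ofList values).filter (fun k => ((List.count k values : Nat) : Int) == mv) := by
        rw [PySem.Dict.items_counter, List.filter_map, List.map_map]
        simp [Function.comp_def]
      rw [hmc]
      -- the filter is nonempty and every element of it is m
      have hall : ∀ j ∈ (PySem.Set.ofList values).filter
          (fun k => ((List.count k values : Nat) : Int) == mv), j = m := by
        intro j hj
        rw [List.mem_filter] at hj
        obtain ⟨hj1, hj2⟩ := hj
        have hj2' : ((List.count j values : Nat) : Int) = mv := by simpa using hj2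
        by_contra hne
        have h2 := pv_count_two_le j m hne values
        have h7 : List.count j values = List.count m values := by
          rw [hmvm] at hj2'; exact_mod_cast hj2'
        omega
      have hmemf : m ∈ (PySem.Set.ofList values).filter
          (fun k => ((List.count k values : Nat) : Int) == mv) := by
        rw [List.mem_filter]
        exact ⟨(PySem.Set.mem_ofList ..).2 hmmem, by rw [hmvm]; simp⟩
      cases hf : (PySem.Set.ofList values).filter
          (fun k => ((List.count k values : Nat) : Int) == mv) with
      | nil => rw [hf] at hmemf; simp at hmemf
      | cons a rest =>
        rw [pv_pyGet?_zero _ (by simp)]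
        have ha : a = m := hall a (by rw [hf]; exact List.mem_cons_self ..)
        simp [ha]
    · -- no strict majority: both fall through to the closest-value phase
      push Not at hmaj
      have hcondA : ¬ mv > PySem.Int.floordiv (values.length : Int) 2 := by
        rw [hfd, hk0]
        have h1 := hmaj k0
        have h8 : List.count k0 values ≤ values.length / 2 := by omega
        simpa using
          (by exact_mod_cast h8 :
            ((List.count k0 values : Nat) : Int) ≤ ((values.length / 2 : Nat) : Int))
      rw [if_neg hcondA]
      have hcondB : ¬ (PySem.List.count values (values.foldl pvBmStep (0, 0)).1 : Int) >
          PySem.Int.floordiv (values.length : Int) 2 := by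
        rw [hfd]
        have h1 := hmaj (values.foldl pvBmStep (0, 0)).1
        have h8 : PySem.List.count values (values.foldl pvBmStep (0, 0)).1 ≤ values.length / 2 := by
          show List.count _ values ≤ _
          omega
        simpa using
          (by exact_mod_cast h8 :
            ((PySem.List.count values (values.foldl pvBmStep (0, 0)).1 : Nat) : Int) ≤
              ((values.length / 2 : Nat) : Int))
      rw [if_neg hcondB]
      -- phase 2: A's loop over values = min? over the nonzero values
      rw [pv_close_filter values previous_result (none, none)]
      have hst : (values.filter (fun v => v != 0)).foldl
          (fun s v =>
            if (match s.2 with | none => true | some d => decide (|v - previous_result| < d)) then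
              (some v, some (|v - previous_result|))
            else s) ((none : Option Int), (none : Option Int)) =
          ((values.filter (fun v => v != 0)).foldl (pvMinStep previous_result) none,
            ((values.filter (fun v => v != 0)).foldl (pvMinStep previous_result) none).map
              (fun v => |v - previous_result|)) :=
        pv_close_min (values.filter (fun v => v != 0)) previous_result none
      rw [hst, pv_min?_eq_foldl (values.filter (fun v => v != 0)) previous_result]
      cases hres : (values.filter (fun v => v != 0)).foldl (pvMinStep previous_result) none with
      | none => simp
      | some best =>
        by_cases hle : |best - previous_result| ≤ threshold
        · simp [hle]
        · simp [hle]

-- ===== VERDICT (by name: the statement is the Claim_ definition above) =====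
theorem smoothing_algorithm_spec : Claim_equal_smoothing_algorithm := by
  intro values previous_result threshold _
  show _ = _
  exact smoothing_algorithm_spec_aux values previous_result threshold
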